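-- pv_equiv track=rewrite | github.com/egarrityrokous/portfolio | lab05/swedishpuzzle.py | convert
-- ===== SOURCE A (Python) =====
-- def convert(letter, word):
--     """
--     Converts the inputed word into a Rovarkspraket format, using
--     the supplied letter as a separator.
--     """
--     answer = '' # FIXED lack of accumulator string
--     for char in word: # FIXED lack of colon and incorrect use of range()
--         if char in 'aeiou':
--             answer += char
--         else:
--             answer += char + letter + char
--     return answer
-- ===== SOURCE B (Python) =====
-- import re
--
-- def convert(letter, word):
--     return re.sub(r'[^aeiou]', lambda m: m.group(0) + letter + m.group(0), word)
-- ===== Notes on version B (the rewrite author's own statement) =====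
-- stated objective: idiomatic
-- what changed: Replaced the explicit if/else accumulator loop with a single re.sub over the negated class [^aeiou] using a replacement function, so the regex engine does the traversal; the Lean port is the recursive scan of that substitution rather than A's fold with a growing accumulator.
import Mathlib
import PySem

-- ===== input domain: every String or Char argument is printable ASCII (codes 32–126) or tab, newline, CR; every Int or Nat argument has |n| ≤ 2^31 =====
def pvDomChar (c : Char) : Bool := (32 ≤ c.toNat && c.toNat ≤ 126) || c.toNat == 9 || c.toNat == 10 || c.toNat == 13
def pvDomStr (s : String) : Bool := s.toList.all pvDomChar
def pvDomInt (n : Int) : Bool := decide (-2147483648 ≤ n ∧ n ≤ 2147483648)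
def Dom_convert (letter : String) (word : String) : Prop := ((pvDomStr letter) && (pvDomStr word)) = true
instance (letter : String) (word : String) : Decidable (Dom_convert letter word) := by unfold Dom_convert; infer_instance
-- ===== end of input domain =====

-- B replaces A's if/else accumulator loop by re.sub(r'[^aeiou]', …) with a replacement
-- function: same return value, idiomatic one-liner.

-- ===== PORT A =====
-- A: explicit loop with a growing accumulator string, branching per character.
def convert (letter : String) (word : String) : String :=
  String.ofList (word.toList.foldl
    (fun answer c =>
      if c ∈ ['a','e','i','o','u'] then answer ++ [c]
      else answer ++ (c :: letter.toList ++ [c]))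
    [])

-- ===== PORT B =====
-- B: the regex engine's scan for single-character matches of the negated class
-- [^aeiou]: walk the text, splice in the replacement at each match, keep
-- non-matching characters; ported as structural recursion over the text.
def regexSubNotVowel (repl : List Char) : List Char → List Char
  | [] => []
  | c :: rest =>
    if (['a','e','i','o','u'].contains c) = false then
      -- c matches [^aeiou]: emit the replacement m.group(0) + letter + m.group(0)
      c :: (repl ++ c :: regexSubNotVowel repl rest)
    else
      c :: regexSubNotVowel repl rest

def convert_alt (letter : String) (word : String) : String :=
  String.ofList (regexSubNotVowel letter.toList word.toList)

-- ===== PRECONDITION & SPEC =====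
def Spec_convert (letter : String) (word : String) (out : String) : Prop := out = convert_alt letter word
instance (letter : String) (word : String) (out : String) : Decidable (Spec_convert letter word out) := by unfold Spec_convert; infer_instance

-- ===== CLAIM =====
def Claim_equal_convert : Prop := ∀ (letter : String) (word : String), Dom_convert letter word → Spec_convert letter word (convert letter word)

-- ===== LEMMAS AND PROOFS =====
theorem convert_foldl_eq (letter : List Char) (l : List Char) (acc : List Char) :
    l.foldl (fun answer c =>
      if c ∈ ['a','e','i','o','u'] then answer ++ [c]
      else answer ++ (c :: letter ++ [c])) acc
    = acc ++ regexSubNotVowel letter l := by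
  induction l generalizing acc with
  | nil => simp [regexSubNotVowel]
  | cons c rest ih =>
    by_cases h : c ∈ ['a','e','i','o','u']
    · have h' : (['a','e','i','o','u'].contains c) = true := by simpa using h
      rw [List.foldl_cons, if_pos h, ih]
      simp only [regexSubNotVowel, h', Bool.true_eq_false, if_false]
      simp
    · have h' : (['a','e','i','o','u'].contains c) = false := by simpa using h
      rw [List.foldl_cons, if_neg h, ih]
      simp only [regexSubNotVowel, h', if_true]
      simp

-- ===== VERDICT =====
theorem convert_spec : Claim_equal_convert := by
  intro letter word _
  unfold Spec_convert convert convert_alt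
  rw [convert_foldl_eq letter.toList word.toList []]
  rfl
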